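-- pv_equiv track=rewrite | github.com/linus200516/mathsCW | DocSearch3.py | documentVector
-- ===== SOURCE A (Python) =====
-- def documentVector(doc, dictionary):
--     vector = [0] * len(dictionary)
--     wordsInDoc = doc.split()
--     i = 0
--     for word in dictionary:
--         count = wordsInDoc.count(word)
--         vector[i] = count
--         i+= 1
--     return vector
-- ===== SOURCE B (Python) =====
-- def documentVector(doc, dictionary):
--     # Build an index word -> list of positions in dictionary (duplicates kept),
--     # then make a single pass over the document, pushing counts into the vector.
--     index = {}
--     for i, w in enumerate(dictionary):
--         index.setdefault(w, []).append(i)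
--     vector = [0] * len(dictionary)
--     for word in doc.split():
--         for i in index.get(word, []):
--             vector[i] += 1
--     return vector
-- ===== Notes on version B (the rewrite author's own statement) =====
-- stated objective: alternative
-- what changed: Instead of scanning the split document once per dictionary word (list.count in a loop), B builds a dict mapping each word to its list of dictionary positions and makes a single pass over the document words, incrementing the vector at the indexed positions.
import Mathlib
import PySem

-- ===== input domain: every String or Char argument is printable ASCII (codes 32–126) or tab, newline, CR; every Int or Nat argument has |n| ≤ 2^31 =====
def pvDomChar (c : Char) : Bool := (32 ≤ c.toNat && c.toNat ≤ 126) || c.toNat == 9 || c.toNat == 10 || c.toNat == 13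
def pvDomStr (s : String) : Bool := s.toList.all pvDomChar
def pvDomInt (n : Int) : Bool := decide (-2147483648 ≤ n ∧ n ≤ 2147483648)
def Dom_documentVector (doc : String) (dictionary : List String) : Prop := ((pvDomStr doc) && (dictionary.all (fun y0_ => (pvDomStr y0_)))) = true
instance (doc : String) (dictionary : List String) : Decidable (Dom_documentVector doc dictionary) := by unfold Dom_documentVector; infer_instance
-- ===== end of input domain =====

-- B replaces A's per-dictionary-word scan of the document (list.count in a loop) with an
-- index of dictionary positions and a single pass over the document words (objective: alternative).

-- ===== PORT A =====
def documentVector (doc : String) (dictionary : List String) : List Int :=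
  let vector : List Int := List.replicate dictionary.length 0
  let wordsInDoc : List String := PySem.Str.split₀ doc
  (dictionary.foldl
    (fun (s : List Int × Int) word =>
      (PySem.List.pySetD s.1 s.2 ((wordsInDoc.count word : Nat) : Int), s.2 + 1))
    (vector, 0)).1

-- ===== PORT B =====
def documentVector_alt (doc : String) (dictionary : List String) : List Int :=
  let index : PySem.Dict String (List Int) :=
    (PySem.List.enumerate dictionary).foldl
      (fun d p => d.modify p.2 [] (· ++ [p.1])) PySem.Dict.empty
  let vector : List Int := List.replicate dictionary.length 0
  (PySem.Str.split₀ doc).foldl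
    (fun v word =>
      (index.getD word []).foldl
        (fun v i => PySem.List.pySetD v i (PySem.List.pyGetD v i 0 + 1)) v)
    vector

-- ===== PRECONDITION & SPEC =====
def Spec_documentVector (doc : String) (dictionary : List String) (out : List Int) : Prop := out = documentVector_alt doc dictionary
instance (doc : String) (dictionary : List String) (out : List Int) : Decidable (Spec_documentVector doc dictionary out) := by unfold Spec_documentVector; infer_instance

-- ===== CLAIM (what is proved, stated in full; the proofs are below) =====
def Claim_equal_documentVector : Prop := ∀ (doc : String) (dictionary : List String), Dom_documentVector doc dictionary → Spec_documentVector doc dictionary (documentVector doc dictionary)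

-- ===== LEMMAS AND PROOFS =====

-- A's loop: writing the counts at positions 0,1,2,… over the zero vector builds the map of counts.
theorem a_loop (ws : List String) :
    ∀ (dict : List String) (v : List Int) (i : Nat), v.length = i + dict.length →
    (dict.foldl
      (fun (s : List Int × Int) word =>
        (PySem.List.pySetD s.1 s.2 ((ws.count word : Nat) : Int), s.2 + 1))
      (v, (i : Int))).1
    = v.take i ++ dict.map (fun word => ((ws.count word : Nat) : Int)) := by
  intro dict
  induction dict with
  | nil => intro v i h; simp at h; simp [List.take_of_length_le (le_of_eq h)]
  | cons word dict ih =>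
    intro v i h
    have hi : i < v.length := by simp at h; omega
    simp only [List.foldl_cons, PySem.List.pySetD_natCast]
    have hcast : ((i : Int) + 1) = ((i + 1 : Nat) : Int) := by push_cast; ring
    rw [hcast, ih (v.set i ((ws.count word : Nat) : Int)) (i+1) (by simp at h ⊢; omega)]
    have : (v.set i ((ws.count word : Nat) : Int)).take (i+1)
        = v.take i ++ [((ws.count word : Nat) : Int)] := by
      rw [List.take_set, List.take_add_one, List.getElem?_eq_getElem hi, List.set_append]
      simp [List.length_take, Nat.min_eq_left (le_of_lt hi)]
    simp [this]

-- B's index-building loop: the entry of a word is the list of its positions in the dictionary.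
theorem idx_getD (w : String) :
    ∀ (dict : List String) (s : Int) (d : PySem.Dict String (List Int)),
    ((PySem.List.enumerate dict s).foldl
      (fun d p => d.modify p.2 [] (· ++ [p.1])) d).getD w []
    = d.getD w [] ++ ((PySem.List.enumerate dict s).filter (fun p => p.2 == w)).map Prod.fst := by
  intro dict
  induction dict with
  | nil => intro s d; simp [PySem.List.enumerate_nil]
  | cons x dict ih =>
    intro s d
    rw [PySem.List.enumerate_cons]
    simp only [List.foldl_cons, List.filter_cons]
    rw [ih]
    by_cases hx : x = w
    · subst hx
      simp [PySem.Dict.getD_modify_self]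
    · have : ((s, x).2 == w) = false := by simp [hx]
      rw [PySem.Dict.getD_modify_of_ne _ _ _ (fun h => hx h.symm)]
      simp [this]

theorem mem_posList (w : String) :
    ∀ (dict : List String) (s : Int) (j : Int),
    j ∈ (((PySem.List.enumerate dict s).filter (fun p => p.2 == w)).map Prod.fst) ↔
    ∃ k : Nat, k < dict.length ∧ j = s + k ∧ dict.getD k "" = w := by
  intro dict
  induction dict with
  | nil => intro s j; simp [PySem.List.enumerate_nil]
  | cons x dict ih =>
    intro s j
    rw [PySem.List.enumerate_cons]
    simp only [List.filter_cons]
    by_cases hx : x = w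
    · subst hx
      simp only [beq_self_eq_true, if_true, List.map_cons, List.mem_cons, ih]
      constructor
      · rintro (h | ⟨k, hk, hj, hw⟩)
        · exact ⟨0, by simp, by simpa using h, by simp⟩
        · exact ⟨k+1, by simp; omega, by push_cast; omega, by simpa using hw⟩
      · rintro ⟨k, hk, hj, hw⟩
        cases k with
        | zero => left; simpa using hj
        | succ k => right; exact ⟨k, by simp at hk; omega, by push_cast at hj ⊢; omega, by simpa using hw⟩
    · have hb : (((s, x) : Int × String).2 == w) = false := by simp [hx]
      rw [hb]
      simp only [Bool.false_eq_true, if_false, ih]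
      constructor
      · rintro ⟨k, hk, hj, hw⟩
        exact ⟨k+1, by simp; omega, by push_cast; omega, by simpa using hw⟩
      · rintro ⟨k, hk, hj, hw⟩
        cases k with
        | zero => exact absurd (by simpa using hw) hx
        | succ k => exact ⟨k, by simp at hk; omega, by push_cast at hj ⊢; omega, by simpa using hw⟩

theorem nodup_posList (w : String) (dict : List String) (s : Int) :
    (((PySem.List.enumerate dict s).filter (fun p => p.2 == w)).map Prod.fst).Nodup := by
  have hsub : (((PySem.List.enumerate dict s).filter (fun p => p.2 == w)).map Prod.fst).Sublist
      ((PySem.List.enumerate dict s).map Prod.fst) :=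
    List.Sublist.map _ List.filter_sublist
  have : ((PySem.List.enumerate dict s).map Prod.fst).Nodup := by
    rw [show (Prod.fst : Int × String → Int) = (·.1) from rfl, PySem.List.map_fst_enumerate]
    exact PySem.List.nodup_pyRange_one _ _
  exact hsub.nodup this

-- B's inner loop: bumping the vector once at each of a nodup list of in-range positions.
theorem bump_fold :
    ∀ (P : List Int) (v : List Int), P.Nodup → (∀ i ∈ P, 0 ≤ i ∧ i.toNat < v.length) →
    (P.foldl (fun v i => PySem.List.pySetD v i (PySem.List.pyGetD v i 0 + 1)) v).length = v.length ∧
    ∀ j : Nat, (P.foldl (fun v i => PySem.List.pySetD v i (PySem.List.pyGetD v i 0 + 1)) v).getD j 0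
      = v.getD j 0 + (if (j : Int) ∈ P then 1 else 0) := by
  intro P
  induction P with
  | nil => intro v _ _; simp
  | cons i P ih =>
    intro v hnd hin
    obtain ⟨hi0, hilen⟩ := hin i (by simp)
    have hset : PySem.List.pySetD v i (PySem.List.pyGetD v i 0 + 1)
        = v.set i.toNat (PySem.List.pyGetD v i 0 + 1) := PySem.List.pySetD_of_nonneg _ _ hi0
    simp only [List.foldl_cons, hset]
    have hlen' : (v.set i.toNat (PySem.List.pyGetD v i 0 + 1)).length = v.length := by simp
    obtain ⟨hL, hG⟩ := ih (v.set i.toNat (PySem.List.pyGetD v i 0 + 1))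
      (by exact hnd.of_cons)
      (by intro k hk; rw [hlen']; exact hin k (by simp [hk]))
    refine ⟨by rw [hL, hlen'], ?_⟩
    intro j
    rw [hG j]
    have hiP : i ∉ P := by simp at hnd; exact hnd.1
    by_cases hj : (j : Int) = i
    · have hjn : j = i.toNat := by omega
      subst hjn
      have : (v.set i.toNat (PySem.List.pyGetD v i 0 + 1)).getD i.toNat 0
          = PySem.List.pyGetD v i 0 + 1 := by
        rw [List.getD_eq_getElem?_getD, List.getElem?_set_self (by omega)]; simp
      rw [this, PySem.List.pyGetD_eq_getElem v 0 hi0 (by omega)]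
      have hvg : v.getD i.toNat 0 = v[i.toNat] := List.getD_eq_getElem v 0 hilen
      rw [hj, if_neg hiP, if_pos (List.mem_cons_self), hvg]; omega
    · have : (v.set i.toNat (PySem.List.pyGetD v i 0 + 1)).getD j 0 = v.getD j 0 := by
        rw [List.getD_eq_getElem?_getD, List.getD_eq_getElem?_getD, List.getElem?_set_ne]
        omega
      rw [this]
      simp [List.mem_cons, hj]

-- B's document loop: each processed word adds 1 exactly at the positions holding that word.
theorem b_loop (dict : List String) :
    ∀ (ws : List String) (v : List Int), v.length = dict.length →
    (ws.foldl (fun v word =>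
      ((((PySem.List.enumerate dict 0).filter (fun p => p.2 == word)).map Prod.fst).foldl
        (fun v i => PySem.List.pySetD v i (PySem.List.pyGetD v i 0 + 1)) v)) v).length = dict.length ∧
    ∀ j : Nat, j < dict.length →
    (ws.foldl (fun v word =>
      ((((PySem.List.enumerate dict 0).filter (fun p => p.2 == word)).map Prod.fst).foldl
        (fun v i => PySem.List.pySetD v i (PySem.List.pyGetD v i 0 + 1)) v)) v).getD j 0
      = v.getD j 0 + ((ws.count (dict.getD j "") : Nat) : Int) := by
  intro ws
  induction ws with
  | nil => intro v hv; exact ⟨by simpa using hv, by intro j _; simp⟩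
  | cons word ws ih =>
    intro v hv
    simp only [List.foldl_cons]
    have hP : ∀ i ∈ (((PySem.List.enumerate dict 0).filter (fun p => p.2 == word)).map Prod.fst),
        0 ≤ i ∧ i.toNat < v.length := by
      intro i hi
      obtain ⟨k, hk, hik, -⟩ := (mem_posList word dict 0 i).1 hi
      constructor <;> omega
    obtain ⟨hbl, hbg⟩ := bump_fold _ v (nodup_posList word dict 0) hP
    obtain ⟨hL, hG⟩ := ih _ (by rw [hbl, hv])
    refine ⟨hL, ?_⟩
    intro j hj
    rw [hG j hj, hbg j]
    have hmem : ((j : Int) ∈ (((PySem.List.enumerate dict 0).filter (fun p => p.2 == word)).map Prod.fst))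
        ↔ dict.getD j "" = word := by
      rw [mem_posList]
      constructor
      · rintro ⟨k, hk, hjk, hw⟩
        have : k = j := by omega
        subst this; exact hw
      · intro h; exact ⟨j, hj, by omega, h⟩
    by_cases hw : dict.getD j "" = word
    · rw [if_pos (hmem.2 hw), List.count_cons, if_pos (by simpa using hw.symm)]
      push_cast; omega
    · rw [if_neg (fun h => hw (hmem.1 h)), List.count_cons,
        if_neg (by simpa using fun h => hw h.symm)]
      omega

-- ===== VERDICT (by name: the statement is the Claim_ definition above) =====
theorem documentVector_spec : Claim_equal_documentVector := by
  intro doc dictionary _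
  unfold Spec_documentVector documentVector documentVector_alt
  simp only []
  have ha := a_loop (PySem.Str.split₀ doc) dictionary (List.replicate dictionary.length 0) 0 (by simp)
  rw [Nat.cast_zero] at ha
  rw [ha]
  have hidx : ∀ word, ((PySem.List.enumerate dictionary).foldl
      (fun d p => d.modify p.2 [] (· ++ [p.1])) PySem.Dict.empty).getD word []
      = ((PySem.List.enumerate dictionary 0).filter (fun p => p.2 == word)).map Prod.fst := by
    intro word
    rw [show PySem.List.enumerate dictionary = PySem.List.enumerate dictionary 0 from rfl,
      idx_getD word dictionary 0 PySem.Dict.empty]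
    rfl
  simp only [hidx]
  obtain ⟨hL, hG⟩ := b_loop dictionary (PySem.Str.split₀ doc)
    (List.replicate dictionary.length 0) (by simp)
  apply List.ext_getElem
  · simpa using hL.symm
  · intro j hj1 hj2
    have hj : j < dictionary.length := by simpa using hj1
    have h2 := hG j hj
    rw [List.getD_eq_getElem _ 0 hj2] at h2
    simp only [List.take_zero, List.nil_append]
    rw [h2, List.getElem_map, List.getD_eq_getElem dictionary "" hj]
    simp
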